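-- pv_equiv track=rewrite | github.com/Thwani47/blog-code | demo.py | make_position_pattern
-- ===== SOURCE A (Python) =====
-- def make_position_pattern(pos_square_size):
--     """
--     Creates the position pattern of size pos_square_size and returning it as a
--     2-dimensional array of int.
--
--     Args:
--         pos_square_size (int): The size of the position pattern to generate
--
--     Returns:
--         2D array of int: The position pattern
--     """
--     # TODO: implement this function.
--     # remove the following line when you add something to this function:
--     pattern = [[0 for _ in range(pos_square_size)] for _ in range(pos_square_size)]
--
--     if pos_square_size == 4:
--         # Fill the first 3 columns of the first 3 rows with 1s
--         for i in range(3):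
--             for j in range(3):
--                 pattern[i][j] = 1
--
--     elif pos_square_size == 6:
--         # Fill the last column with 1s except the last position
--         for i in range(pos_square_size - 1):
--             pattern[i][pos_square_size - 1] = 1
--
--         # Fill the last row with 1s
--         for j in range(pos_square_size):
--             pattern[pos_square_size - 1][j] = 1
--
--         # Fill the middle 3x3 square with 1s
--         for i in range(1, 4):
--             for j in range(1, 4):
--                 pattern[i][j] = 1
--
--     else:  # pos_square_size >= 8
--         # Fill the first column with 1s except the last position
--         for i in range(pos_square_size - 1):
--             pattern[i][0] = 1
--
--         # Fill the first row with 1s except the last position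
--         for j in range(pos_square_size - 1):
--             pattern[0][j] = 1
--
--         # Fill the 7th column with 1s except the last position
--         for i in range(pos_square_size - 1):
--             pattern[i][pos_square_size - 2] = 1
--
--         # Fill the 7th row with 1s except the last position
--         for j in range(pos_square_size - 1):
--             pattern[pos_square_size - 2][j] = 1
--
--         # Fill the inner square pattern (3x3) repeated
--         inner_start = 2
--         inner_end = pos_square_size - 3
--         for i in range(inner_start, inner_end):
--             for j in range(inner_start, inner_end):
--                 pattern[i][j] = 1
--
--     return pattern
-- ===== SOURCE B (Python) =====
-- def make_position_pattern(pos_square_size):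
--     """Build the position pattern in one pass: each cell is decided by a membership predicate."""
--     n = pos_square_size
--     if n == 4:
--         return [[1 if (i < 3 and j < 3) else 0
--                  for j in range(n)] for i in range(n)]
--     if n == 6:
--         return [[1 if ((j == 5 and i < 5) or i == 5
--                        or (1 <= i <= 3 and 1 <= j <= 3)) else 0
--                  for j in range(n)] for i in range(n)]
--     return [[1 if ((j == 0 and i < n - 1) or (i == 0 and j < n - 1)
--                    or (j == n - 2 and i < n - 1) or (i == n - 2 and j < n - 1)
--                    or (2 <= i < n - 3 and 2 <= j < n - 3)) else 0
--              for j in range(n)] for i in range(n)]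
-- ===== Notes on version B (the rewrite author's own statement) =====
-- stated objective: simpler
-- what changed: Replaced allocate-then-paint (a zero grid mutated by five region loops per case) with a single double comprehension that decides each cell once via a per-cell membership predicate encoding the union of the stamped regions.
import Mathlib
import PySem

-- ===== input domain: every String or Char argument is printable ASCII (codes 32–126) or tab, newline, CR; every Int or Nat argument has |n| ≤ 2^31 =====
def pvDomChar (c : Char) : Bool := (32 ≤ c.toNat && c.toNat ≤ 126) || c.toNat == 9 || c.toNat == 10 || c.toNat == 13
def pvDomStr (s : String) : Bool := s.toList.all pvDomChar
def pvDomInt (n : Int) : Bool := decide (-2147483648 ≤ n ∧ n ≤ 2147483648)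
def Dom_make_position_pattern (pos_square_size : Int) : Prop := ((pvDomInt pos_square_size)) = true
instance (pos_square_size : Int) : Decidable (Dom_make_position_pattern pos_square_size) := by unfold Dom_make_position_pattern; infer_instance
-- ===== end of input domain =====

-- B builds the grid in one pass with a per-cell membership predicate instead of allocating and painting regions.


-- ===== PORT A =====
-- pattern[i][j] = 1: exact where row index i is in range, which holds on every assignment A executes
-- (out-of-range row access would raise in Python; no branch of A reaches one).
def setCell (g : List (List Int)) (i j v : Int) : List (List Int) :=
  PySem.List.pySetD g i (PySem.List.pySetD (PySem.List.pyGetD g i []) j v)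

def make_position_pattern (pos_square_size : Int) : List (List Int) :=
  let pattern : List (List Int) :=
    (PySem.List.pyRange 0 pos_square_size 1).map (fun _ =>
      (PySem.List.pyRange 0 pos_square_size 1).map (fun _ => (0 : Int)))
  if pos_square_size = 4 then
    (PySem.List.pyRange 0 3 1).foldl (fun p i =>
      (PySem.List.pyRange 0 3 1).foldl (fun p j => setCell p i j 1) p) pattern
  else if pos_square_size = 6 then
    let p1 := (PySem.List.pyRange 0 (pos_square_size - 1) 1).foldl
      (fun p i => setCell p i (pos_square_size - 1) 1) pattern
    let p2 := (PySem.List.pyRange 0 pos_square_size 1).foldl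
      (fun p j => setCell p (pos_square_size - 1) j 1) p1
    (PySem.List.pyRange 1 4 1).foldl (fun p i =>
      (PySem.List.pyRange 1 4 1).foldl (fun p j => setCell p i j 1) p) p2
  else
    let p1 := (PySem.List.pyRange 0 (pos_square_size - 1) 1).foldl
      (fun p i => setCell p i 0 1) pattern
    let p2 := (PySem.List.pyRange 0 (pos_square_size - 1) 1).foldl
      (fun p j => setCell p 0 j 1) p1
    let p3 := (PySem.List.pyRange 0 (pos_square_size - 1) 1).foldl
      (fun p i => setCell p i (pos_square_size - 2) 1) p2
    let p4 := (PySem.List.pyRange 0 (pos_square_size - 1) 1).foldl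
      (fun p j => setCell p (pos_square_size - 2) j 1) p3
    let innerStart : Int := 2
    let innerEnd : Int := pos_square_size - 3
    (PySem.List.pyRange innerStart innerEnd 1).foldl (fun p i =>
      (PySem.List.pyRange innerStart innerEnd 1).foldl (fun p j => setCell p i j 1) p) p4

-- ===== PORT B =====
def make_position_pattern_alt (pos_square_size : Int) : List (List Int) :=
  if pos_square_size = 4 then
    (PySem.List.pyRange 0 pos_square_size 1).map (fun i =>
      (PySem.List.pyRange 0 pos_square_size 1).map (fun j =>
        if decide (i < 3) && decide (j < 3) then (1 : Int) else 0))
  else if pos_square_size = 6 then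
    (PySem.List.pyRange 0 pos_square_size 1).map (fun i =>
      (PySem.List.pyRange 0 pos_square_size 1).map (fun j =>
        if (decide (j = 5) && decide (i < 5)) || decide (i = 5) ||
            (decide (1 ≤ i) && decide (i ≤ 3) && decide (1 ≤ j) && decide (j ≤ 3)) then
          (1 : Int) else 0))
  else
    (PySem.List.pyRange 0 pos_square_size 1).map (fun i =>
      (PySem.List.pyRange 0 pos_square_size 1).map (fun j =>
        if (decide (j = 0) && decide (i < pos_square_size - 1)) ||
            (decide (i = 0) && decide (j < pos_square_size - 1)) ||
            (decide (j = pos_square_size - 2) && decide (i < pos_square_size - 1)) ||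
            (decide (i = pos_square_size - 2) && decide (j < pos_square_size - 1)) ||
            (decide (2 ≤ i) && decide (i < pos_square_size - 3) &&
             decide (2 ≤ j) && decide (j < pos_square_size - 3)) then
          (1 : Int) else 0))

-- ===== PRECONDITION & SPEC =====
def Spec_make_position_pattern (pos_square_size : Int) (out : List (List Int)) : Prop := out = make_position_pattern_alt pos_square_size
instance (pos_square_size : Int) (out : List (List Int)) : Decidable (Spec_make_position_pattern pos_square_size out) := by unfold Spec_make_position_pattern; infer_instance

-- ===== CLAIM (what is proved, stated in full; the proofs are below) =====
def Claim_equal_make_position_pattern : Prop := ∀ (pos_square_size : Int), Dom_make_position_pattern pos_square_size → Spec_make_position_pattern pos_square_size (make_position_pattern pos_square_size)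

-- ===== LEMMAS AND PROOFS =====

/-- The grid whose (i,j) cell is 1 exactly where `P i j` holds. -/
def pvGrid (n : Int) (P : Int → Int → Bool) : List (List Int) :=
  (PySem.List.pyRange 0 n 1).map (fun i =>
    (PySem.List.pyRange 0 n 1).map (fun j => if P i j then (1 : Int) else 0))

theorem pvGrid_congr {n : Int} {P Q : Int → Int → Bool}
    (h : ∀ a b, 0 ≤ a → a < n → 0 ≤ b → b < n → P a b = Q a b) :
    pvGrid n P = pvGrid n Q := by
  unfold pvGrid
  refine List.map_congr_left (fun a ha => ?_)
  rw [PySem.List.mem_pyRange_one] at ha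
  refine List.map_congr_left (fun b hb => ?_)
  rw [PySem.List.mem_pyRange_one] at hb
  rw [h a b ha.1 ha.2 hb.1 hb.2]

theorem pySetD_map_pyRange {α : Type} (f : Int → α) (n i : Int) (v : α)
    (hi : 0 ≤ i) (hin : i < n) :
    PySem.List.pySetD ((PySem.List.pyRange 0 n 1).map f) i v
      = (PySem.List.pyRange 0 n 1).map (fun a => if a = i then v else f a) := by
  rw [PySem.List.pySetD_of_nonneg _ _ hi]
  apply List.ext_getElem
  · simp
  · intro k h1 h2
    simp only [List.getElem_set, List.getElem_map, PySem.List.getElem_pyRange_one]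
    simp only [List.length_set, List.length_map, PySem.List.length_pyRange_one] at h1
    by_cases hk : i.toNat = k
    · rw [if_pos hk, if_pos (by omega)]
    · rw [if_neg hk, if_neg (by omega)]

theorem setCell_grid (n i j : Int) (P : Int → Int → Bool)
    (hi : 0 ≤ i) (hin : i < n) (hj : 0 ≤ j) (hjn : j < n) :
    setCell (pvGrid n P) i j 1
      = pvGrid n (fun a b => P a b || (decide (a = i) && decide (b = j))) := by
  unfold setCell pvGrid
  rw [PySem.List.pyGetD_map_pyRange_of_nonneg _ _ _ _ hi hin]
  rw [pySetD_map_pyRange _ _ _ _ hj hjn]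
  rw [pySetD_map_pyRange _ _ _ _ hi hin]
  refine List.map_congr_left (fun a ha => ?_)
  by_cases hai : a = i
  · subst hai
    rw [if_pos rfl]
    refine List.map_congr_left (fun b hb => ?_)
    by_cases hbj : b = j <;> simp [hbj]
  · rw [if_neg hai]
    refine List.map_congr_left (fun b hb => ?_)
    simp [hai]

theorem paintColSeg (n c s : Int) (k : Nat) {P : Int → Int → Bool}
    (hc : 0 ≤ c) (hcn : c < n) (hs : 0 ≤ s) (hsk : s + (k : Int) ≤ n) :
    (PySem.List.pyRange s (s + (k : Int)) 1).foldl (fun p i => setCell p i c 1) (pvGrid n P)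
      = pvGrid n (fun a b => P a b ||
          (decide (s ≤ a) && decide (a < s + (k : Int)) && decide (b = c))) := by
  induction k generalizing P with
  | zero =>
    rw [show s + ((0 : Nat) : Int) = s by omega, PySem.List.pyRange_one_eq_nil (by omega),
      List.foldl_nil]
    apply pvGrid_congr
    intro a b _ _ _ _
    rw [Bool.eq_iff_iff]
    by_cases hP : P a b = true
    · simp [hP]
    · simp only [Bool.not_eq_true] at hP
      simp only [hP, Bool.false_or, Bool.or_eq_true, Bool.and_eq_true, decide_eq_true_eq,
        Bool.false_eq_true, false_iff]
      push_cast
      omega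
  | succ m ih =>
    rw [show s + ((m + 1 : Nat) : Int) = (s + (m : Nat)) + 1 by push_cast; ring,
      PySem.List.pyRange_one_succ_right (by omega), List.foldl_append, ih (by push_cast at hsk ⊢; omega),
      List.foldl_cons, List.foldl_nil,
      setCell_grid n (s + (m : Nat)) c _ (by omega) (by push_cast at hsk ⊢; omega) hc hcn]
    apply pvGrid_congr
    intro a b _ _ _ _
    rw [Bool.eq_iff_iff]
    by_cases hP : P a b = true
    · simp [hP]
    · simp only [Bool.not_eq_true] at hP
      simp only [hP, Bool.false_or, Bool.or_eq_true, Bool.and_eq_true, decide_eq_true_eq,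
        Bool.false_eq_true, false_iff]
      push_cast
      omega

theorem paintRowSeg (n r s : Int) (k : Nat) {P : Int → Int → Bool}
    (hr : 0 ≤ r) (hrn : r < n) (hs : 0 ≤ s) (hsk : s + (k : Int) ≤ n) :
    (PySem.List.pyRange s (s + (k : Int)) 1).foldl (fun p j => setCell p r j 1) (pvGrid n P)
      = pvGrid n (fun a b => P a b ||
          (decide (a = r) && decide (s ≤ b) && decide (b < s + (k : Int)))) := by
  induction k generalizing P with
  | zero =>
    rw [show s + ((0 : Nat) : Int) = s by omega, PySem.List.pyRange_one_eq_nil (by omega),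
      List.foldl_nil]
    apply pvGrid_congr
    intro a b _ _ _ _
    rw [Bool.eq_iff_iff]
    by_cases hP : P a b = true
    · simp [hP]
    · simp only [Bool.not_eq_true] at hP
      simp only [hP, Bool.false_or, Bool.or_eq_true, Bool.and_eq_true, decide_eq_true_eq,
        Bool.false_eq_true, false_iff]
      push_cast
      omega
  | succ m ih =>
    rw [show s + ((m + 1 : Nat) : Int) = (s + (m : Nat)) + 1 by push_cast; ring,
      PySem.List.pyRange_one_succ_right (by omega), List.foldl_append, ih (by push_cast at hsk ⊢; omega),
      List.foldl_cons, List.foldl_nil,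
      setCell_grid n r (s + (m : Nat)) _ hr hrn (by omega) (by push_cast at hsk ⊢; omega)]
    apply pvGrid_congr
    intro a b _ _ _ _
    rw [Bool.eq_iff_iff]
    by_cases hP : P a b = true
    · simp [hP]
    · simp only [Bool.not_eq_true] at hP
      simp only [hP, Bool.false_or, Bool.or_eq_true, Bool.and_eq_true, decide_eq_true_eq,
        Bool.false_eq_true, false_iff]
      push_cast
      omega

theorem paintSquareAux (n s : Int) (K k : Nat) (hk : k ≤ K) {P : Int → Int → Bool}
    (hs : 0 ≤ s) (hK : s + (K : Int) ≤ n) :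
    (PySem.List.pyRange s (s + (k : Int)) 1).foldl (fun p i =>
        (PySem.List.pyRange s (s + (K : Int)) 1).foldl (fun p j => setCell p i j 1) p) (pvGrid n P)
      = pvGrid n (fun a b => P a b ||
          (decide (s ≤ a) && decide (a < s + (k : Int)) &&
           decide (s ≤ b) && decide (b < s + (K : Int)))) := by
  induction k generalizing P with
  | zero =>
    rw [show s + ((0 : Nat) : Int) = s by omega,
      PySem.List.pyRange_one_eq_nil (show (s : Int) ≤ s from le_rfl), List.foldl_nil]
    apply pvGrid_congr
    intro a b _ _ _ _
    rw [Bool.eq_iff_iff]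
    by_cases hP : P a b = true
    · simp [hP]
    · simp only [Bool.not_eq_true] at hP
      simp only [hP, Bool.false_or, Bool.or_eq_true, Bool.and_eq_true, decide_eq_true_eq,
        Bool.false_eq_true, false_iff]
      push_cast
      omega
  | succ m ih =>
    rw [show s + ((m + 1 : Nat) : Int) = (s + (m : Nat)) + 1 by push_cast; ring,
      PySem.List.pyRange_one_succ_right (by omega), List.foldl_append,
      ih (by omega), List.foldl_cons, List.foldl_nil,
      paintRowSeg n (s + (m : Nat)) s K (by omega) (by push_cast at hK ⊢; omega) hs hK]
    apply pvGrid_congr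
    intro a b _ _ _ _
    rw [Bool.eq_iff_iff]
    by_cases hP : P a b = true
    · simp [hP]
    · simp only [Bool.not_eq_true] at hP
      simp only [hP, Bool.false_or, Bool.or_eq_true, Bool.and_eq_true, decide_eq_true_eq,
        Bool.false_eq_true, false_iff]
      push_cast
      omega

set_option maxRecDepth 16384 in
theorem make_position_pattern_spec : Claim_equal_make_position_pattern := by
  intro n _
  unfold Spec_make_position_pattern
  by_cases h4 : n = 4
  · subst h4; decide
  by_cases h6 : n = 6
  · subst h6; decide
  by_cases h0 : n ≤ 0
  · simp [make_position_pattern, make_position_pattern_alt, h4, h6,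
      PySem.List.pyRange_one_eq_nil (show n ≤ (0 : Int) from h0),
      PySem.List.pyRange_one_eq_nil (show n - 1 ≤ (0 : Int) by omega),
      PySem.List.pyRange_one_eq_nil (show n - 3 ≤ (2 : Int) by omega)]
  by_cases h1 : n = 1
  · subst h1; decide
  by_cases h2 : n = 2
  · subst h2; decide
  by_cases h3 : n = 3
  · subst h3; decide
  have h5 : 5 ≤ n := by omega
  unfold make_position_pattern make_position_pattern_alt
  simp only [if_neg h4, if_neg h6]
  have halt : ((PySem.List.pyRange 0 n 1).map (fun i =>
      (PySem.List.pyRange 0 n 1).map (fun j =>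
        if (decide (j = 0) && decide (i < n - 1)) ||
            (decide (i = 0) && decide (j < n - 1)) ||
            (decide (j = n - 2) && decide (i < n - 1)) ||
            (decide (i = n - 2) && decide (j < n - 1)) ||
            (decide (2 ≤ i) && decide (i < n - 3) &&
             decide (2 ≤ j) && decide (j < n - 3)) then
          (1 : Int) else 0)))
      = pvGrid n (fun i j =>
          (decide (j = 0) && decide (i < n - 1)) ||
            (decide (i = 0) && decide (j < n - 1)) ||
            (decide (j = n - 2) && decide (i < n - 1)) ||
            (decide (i = n - 2) && decide (j < n - 1)) ||
            (decide (2 ≤ i) && decide (i < n - 3) &&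
             decide (2 ≤ j) && decide (j < n - 3))) := rfl
  rw [halt]
  have hpat : ((PySem.List.pyRange 0 n 1).map (fun _ =>
      (PySem.List.pyRange 0 n 1).map (fun _ => (0 : Int)))) = pvGrid n (fun _ _ => false) := by
    simp [pvGrid]
  rw [hpat]
  obtain ⟨k, hk⟩ : ∃ k : Nat, n - 1 = 0 + (k : Int) := ⟨(n - 1).toNat, by omega⟩
  rw [hk]
  obtain ⟨K, hK⟩ : ∃ K : Nat, n - 3 = 2 + (K : Int) := ⟨(n - 5).toNat, by omega⟩
  rw [hK]
  rw [paintColSeg n 0 0 k le_rfl (by omega) le_rfl (by omega)]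
  rw [paintRowSeg n 0 0 k le_rfl (by omega) le_rfl (by omega)]
  rw [paintColSeg n (n - 2) 0 k (by omega) (by omega) le_rfl (by omega)]
  rw [paintRowSeg n (n - 2) 0 k (by omega) (by omega) le_rfl (by omega)]
  rw [paintSquareAux n 2 K K le_rfl (by omega) (by omega)]
  apply pvGrid_congr
  intro a b ha han hb hbn
  rw [Bool.eq_iff_iff]
  simp only [Bool.or_eq_true, Bool.and_eq_true, decide_eq_true_eq, Bool.false_eq_true, false_or]
  omega
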